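-- pv_equiv track=rewrite | github.com/ColinConwell/AffectExMachina | scripts/misc/clean_bibtex.py | filter_bibtex_entries
-- ===== SOURCE A (Python) =====
-- from typing import Set, Dict, Tuple
--
-- def filter_bibtex_entries(
--     entries: Dict[str, str],
--     used_keys: Set[str]
-- ) -> Tuple[Dict[str, str], Set[str], Set[str]]:
--     """
--     Filter BibTeX entries to keep only those referenced in the document.
--
--     Args:
--         entries: Dictionary of all BibTeX entries
--         used_keys: Set of citation keys used in the source document
--
--     Returns:
--         Tuple of (filtered entries dict, kept keys, removed keys)
--     """
--     filtered = {}
--     kept_keys: Set[str] = set()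
--     removed_keys: Set[str] = set()
--
--     for key, entry in entries.items():
--         if key in used_keys:
--             filtered[key] = entry
--             kept_keys.add(key)
--         else:
--             removed_keys.add(key)
--
--     return filtered, kept_keys, removed_keys
-- ===== SOURCE B (Python) =====
-- def filter_bibtex_entries(entries, used_keys):
--     """Divide and conquer: recursively partition each half of the items, then merge
--     (dict-merge for the filtered entries, set union for the key sets)."""
--     def go(items):
--         if not items:
--             return {}, set(), set()
--         if len(items) == 1:
--             key, entry = items[0]
--             if key in used_keys:
--                 return {key: entry}, {key}, set()
--             return {}, set(), {key}
--         mid = len(items) // 2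
--         f1, kept1, removed1 = go(items[:mid])
--         f2, kept2, removed2 = go(items[mid:])
--         return {**f1, **f2}, kept1 | kept2, removed1 | removed2
--     return go(list(entries.items()))
-- ===== Notes on version B (the rewrite author's own statement) =====
-- stated objective: alternative
-- what changed: Replaces A's single element-wise if/else loop growing three accumulators with a divide-and-conquer recursion that partitions each half of the items independently and merges the halves by dict merge and set union.
import Mathlib
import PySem

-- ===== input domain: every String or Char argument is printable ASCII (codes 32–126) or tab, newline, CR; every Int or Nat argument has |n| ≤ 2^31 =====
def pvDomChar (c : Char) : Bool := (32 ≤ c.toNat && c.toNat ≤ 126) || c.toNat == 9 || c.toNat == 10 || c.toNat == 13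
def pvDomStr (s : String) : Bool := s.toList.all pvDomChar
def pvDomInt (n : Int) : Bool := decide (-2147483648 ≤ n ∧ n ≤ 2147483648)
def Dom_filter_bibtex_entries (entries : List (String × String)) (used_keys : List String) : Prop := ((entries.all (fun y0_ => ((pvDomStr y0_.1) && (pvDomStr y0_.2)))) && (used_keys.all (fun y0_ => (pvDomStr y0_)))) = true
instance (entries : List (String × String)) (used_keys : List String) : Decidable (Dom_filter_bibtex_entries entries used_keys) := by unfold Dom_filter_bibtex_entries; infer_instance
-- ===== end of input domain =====

-- B replaces A's single accumulating if/else loop with a divide-and-conquer recursion: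
-- each half of the items is partitioned independently and the halves are merged by
-- dict merge / set union (alternative decomposition; same observable result).

-- ===== PORT A =====
-- literal port: one loop over entries.items(), growing (filtered dict, kept set, removed set)
def filter_bibtex_entries (entries : List (String × String)) (used_keys : List String) : (List (String × String)) × List String × List String :=
  let r := entries.foldl
    (fun (acc : PySem.Dict String String × PySem.Set String × PySem.Set String) kv =>
      if PySem.Set.contains used_keys kv.1 then
        (acc.1.insert kv.1 kv.2, PySem.Set.add acc.2.1 kv.1, acc.2.2)
      else
        (acc.1, acc.2.1, PySem.Set.add acc.2.2 kv.1))
    (PySem.Dict.empty, PySem.Set.empty, PySem.Set.empty)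
  (r.1.items, r.2.1, r.2.2)

-- ===== PORT B =====
-- literal port of Source B's recursive 'go': base cases for [] and a singleton, otherwise
-- split at mid = len // 2 (items[:mid] / items[mid:] with a nonneg bound = take / drop,
-- exact here), recurse on both halves and merge: {**f1, **f2} is Dict.update f1 f2.items,
-- set union is PySem.Set.union.
def pvGoB (used_keys : List String) : List (String × String) → PySem.Dict String String × PySem.Set String × PySem.Set String
  | [] => (PySem.Dict.empty, PySem.Set.empty, PySem.Set.empty)
  | [kv] =>
      if PySem.Set.contains used_keys kv.1 then
        (PySem.Dict.empty.insert kv.1 kv.2, PySem.Set.ofList [kv.1], PySem.Set.empty)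
      else
        (PySem.Dict.empty, PySem.Set.empty, PySem.Set.ofList [kv.1])
  | a :: b :: t =>
      let mid := (a :: b :: t).length / 2
      let L := pvGoB used_keys ((a :: b :: t).take mid)
      let R := pvGoB used_keys ((a :: b :: t).drop mid)
      (L.1.update R.1.items, PySem.Set.union L.2.1 R.2.1, PySem.Set.union L.2.2 R.2.2)
termination_by l => l.length
decreasing_by
  · simp [List.length_take]; omega
  · simp [List.length_drop]; omega

def filter_bibtex_entries_alt (entries : List (String × String)) (used_keys : List String) : (List (String × String)) × List String × List String :=
  let r := pvGoB used_keys entries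
  (r.1.items, r.2.1, r.2.2)

-- ===== PRECONDITION & SPEC =====
def Spec_filter_bibtex_entries (entries : List (String × String)) (used_keys : List String) (out : (List (String × String)) × List String × List String) : Prop := out = filter_bibtex_entries_alt entries used_keys
instance (entries : List (String × String)) (used_keys : List String) (out : (List (String × String)) × List String × List String) : Decidable (Spec_filter_bibtex_entries entries used_keys out) := by unfold Spec_filter_bibtex_entries; infer_instance

-- ===== CLAIM (what is proved, stated in full; the proofs are below) =====
def Claim_equal_filter_bibtex_entries : Prop := ∀ (entries : List (String × String)) (used_keys : List String), Dom_filter_bibtex_entries entries used_keys → Spec_filter_bibtex_entries entries used_keys (filter_bibtex_entries entries used_keys)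

-- ===== LEMMAS AND PROOFS =====

-- A's triple fold splits into three independent folds
theorem pv_fold_split (used_keys : List String) (l : List (String × String))
    (d : PySem.Dict String String) (s r : PySem.Set String) :
    l.foldl
      (fun (acc : PySem.Dict String String × PySem.Set String × PySem.Set String) kv =>
        if PySem.Set.contains used_keys kv.1 then
          (acc.1.insert kv.1 kv.2, PySem.Set.add acc.2.1 kv.1, acc.2.2)
        else
          (acc.1, acc.2.1, PySem.Set.add acc.2.2 kv.1)) (d, s, r)
    = (l.foldl (fun (d : PySem.Dict String String) kv => if PySem.Set.contains used_keys kv.1 then d.insert kv.1 kv.2 else d) d,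
       l.foldl (fun s kv => if PySem.Set.contains used_keys kv.1 then PySem.Set.add s kv.1 else s) s,
       l.foldl (fun r kv => if PySem.Set.contains used_keys kv.1 then r else PySem.Set.add r kv.1) r) := by
  induction l generalizing d s r with
  | nil => rfl
  | cons kv t ih =>
    simp only [List.foldl_cons]
    by_cases h : PySem.Set.contains used_keys kv.1 = true
    · simp only [if_pos h]; exact ih _ _ _
    · simp only [if_neg h]; exact ih _ _ _

theorem pv_condfold_set (p : String → Bool) (l : List (String × String)) (s : PySem.Set String) :
    l.foldl (fun s kv => if p kv.1 then PySem.Set.add s kv.1 else s) s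
    = PySem.Set.update s ((l.map Prod.fst).filter p) := by
  induction l generalizing s with
  | nil => rfl
  | cons kv t ih =>
    simp only [List.foldl_cons, List.map_cons, List.filter_cons]
    by_cases h : p kv.1 = true <;> simp [h, ih, PySem.Set.update_cons]

-- the conditional dict-insert fold is the plain insert fold over the filtered list
theorem pv_condfold_dict (p : String → Bool) (l : List (String × String)) (d : PySem.Dict String String) :
    l.foldl (fun (d : PySem.Dict String String) kv => if p kv.1 then d.insert kv.1 kv.2 else d) d
    = (l.filter (fun kv => p kv.1)).foldl (fun (d : PySem.Dict String String) kv => d.insert kv.1 kv.2) d := by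
  induction l generalizing d with
  | nil => rfl
  | cons kv t ih =>
    simp only [List.foldl_cons, List.filter_cons]
    by_cases h : p kv.1 = true
    · simp only [if_pos h, List.foldl_cons]; exact ih _
    · simp only [if_neg h]; exact ih _

theorem pv_ofList_append (xs ys : List (String × String)) :
    PySem.Dict.ofList (xs ++ ys) = (PySem.Dict.ofList xs).update ys := by
  show (xs ++ ys).foldl _ _ = _
  rw [List.foldl_append]; rfl

-- lookups after an update: the updated pairs win, last occurrence first
theorem pv_get?_update (zs : List (String × String)) (d : PySem.Dict String String) (k : String) :
    (d.update zs).get? k = ((PySem.Dict.ofList zs).get? k).elim (d.get? k) some := by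
  induction zs using List.reverseRecOn generalizing d with
  | nil => rfl
  | append_singleton t p ih =>
    have h1 : d.update (t ++ [p]) = (d.update t).insert p.1 p.2 := by
      show (t ++ [p]).foldl _ _ = _; rw [List.foldl_append]; rfl
    have h2 : PySem.Dict.ofList (t ++ [p]) = (PySem.Dict.ofList t).insert p.1 p.2 :=
      pv_ofList_append t [p]
    rw [h1, h2, PySem.Dict.get?_insert, PySem.Dict.get?_insert]
    by_cases hk : k = p.1
    · simp [hk]
    · simp only [if_neg hk]; exact ih d

-- a dict with distinct keys is rebuilt unchanged from its items
theorem pv_ofList_items (e : PySem.Dict String String) (he : e.keys.Nodup) :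
    PySem.Dict.ofList e.items = e := by
  apply PySem.Dict.ext
  have h := PySem.Dict.items_foldl_insert_fresh (l := e.items) (k := Prod.fst) (v := Prod.snd)
    (d := PySem.Dict.empty) (by intro a _; exact PySem.Dict.contains_empty a.1) he
  simpa using h

-- updating with a set-of-list adds the same elements as updating with the raw list
theorem pv_set_update_ofList (s : PySem.Set String) (xs : List String) :
    PySem.Set.update s (PySem.Set.ofList xs) = PySem.Set.update s xs := by
  rw [PySem.Set.update_eq_append_filter, PySem.Set.update_eq_append_filter, PySem.Set.ofList_ofList]

-- updating with a canonicalized pair list equals updating with the raw list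
theorem pv_update_ofList_items (d : PySem.Dict String String) (hd : d.keys.Nodup)
    (zs : List (String × String)) :
    d.update (PySem.Dict.ofList zs).items = d.update zs := by
  have hkeysL : (d.update (PySem.Dict.ofList zs).items).keys
      = PySem.Set.update d.keys ((PySem.Dict.ofList zs).items.map Prod.fst) :=
    PySem.Dict.keys_foldl_insert_key (l := (PySem.Dict.ofList zs).items) (key := Prod.fst)
      (f := fun _ p => p.2) (d := d)
  have hkeysR : (d.update zs).keys = PySem.Set.update d.keys (zs.map Prod.fst) :=
    PySem.Dict.keys_foldl_insert_key (l := zs) (key := Prod.fst) (f := fun _ p => p.2) (d := d)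
  have hofkeys : (PySem.Dict.ofList zs).keys = PySem.Set.ofList (zs.map Prod.fst) := by
    have := PySem.Dict.keys_foldl_insert_key (l := zs) (key := Prod.fst)
      (f := fun _ p => p.2) (d := PySem.Dict.empty)
    simpa [PySem.Set.update_nil_left] using this
  have hkeys : (d.update (PySem.Dict.ofList zs).items).keys = (d.update zs).keys := by
    rw [hkeysL, hkeysR]
    have : (PySem.Dict.ofList zs).items.map Prod.fst = PySem.Set.ofList (zs.map Prod.fst) := hofkeys
    rw [this, pv_set_update_ofList]
  have hndL : (d.update (PySem.Dict.ofList zs).items).keys.Nodup :=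
    PySem.Dict.nodup_keys_foldl_insert_key _ Prod.fst _ _ hd
  have hndR : (d.update zs).keys.Nodup := PySem.Dict.nodup_keys_foldl_insert_key _ Prod.fst _ _ hd
  have hget : ∀ k, (d.update (PySem.Dict.ofList zs).items).get? k = (d.update zs).get? k := by
    intro k
    rw [pv_get?_update, pv_get?_update,
      pv_ofList_items (PySem.Dict.ofList zs) (PySem.Dict.nodup_keys_ofList zs)]
  apply PySem.Dict.ext
  rw [PySem.Dict.items_eq_map_keys _ hndL "", PySem.Dict.items_eq_map_keys _ hndR "", hkeys]
  apply List.map_congr_left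
  intro k _
  rw [PySem.Dict.getD_eq_get?_getD, PySem.Dict.getD_eq_get?_getD, hget]

-- the divide-and-conquer recursion computes exactly the filtered canonical forms
theorem pv_goB_eq (used_keys : List String) (l : List (String × String)) :
    pvGoB used_keys l
    = (PySem.Dict.ofList (l.filter (fun kv => PySem.Set.contains used_keys kv.1)),
       PySem.Set.ofList ((l.map Prod.fst).filter (fun k => PySem.Set.contains used_keys k)),
       PySem.Set.ofList ((l.map Prod.fst).filter (fun k => !PySem.Set.contains used_keys k))) := by
  induction l using pvGoB.induct used_keys with
  | case1 => rw [pvGoB]; rfl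
  | case2 kv h =>
    rw [pvGoB]
    have h' : kv.1 ∈ used_keys := by simpa using h
    simp [h', PySem.Dict.ofList]
    rfl
  | case3 kv h =>
    rw [pvGoB]
    have h' : kv.1 ∉ used_keys := by simpa using h
    simp [h', PySem.Dict.ofList]
    rfl
  | case4 a b t mid ih1 ih2 =>
    rw [pvGoB, ih1, ih2]
    have htd := List.take_append_drop ((a :: b :: t).length / 2) (a :: b :: t)
    set m := (a :: b :: t).length / 2
    set L := (a :: b :: t).take m
    set R := (a :: b :: t).drop m
    have hmap : (a :: b :: t).map Prod.fst = L.map Prod.fst ++ R.map Prod.fst := by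
      rw [← List.map_append, htd]
    have hfilt : ∀ (p : (String × String) → Bool),
        (a :: b :: t).filter p = L.filter p ++ R.filter p := by
      intro p; rw [← List.filter_append, htd]
    refine Prod.ext ?_ (Prod.ext ?_ ?_)
    · show (PySem.Dict.ofList (L.filter _)).update (PySem.Dict.ofList (R.filter _)).items = _
      rw [pv_update_ofList_items _ (PySem.Dict.nodup_keys_ofList _),
        ← pv_ofList_append, ← hfilt]
    · show PySem.Set.union (PySem.Set.ofList _) (PySem.Set.ofList _) = _
      show PySem.Set.update (PySem.Set.ofList _) (PySem.Set.ofList _) = _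
      rw [pv_set_update_ofList, ← PySem.Set.ofList_append, ← List.filter_append, ← hmap]
    · show PySem.Set.union (PySem.Set.ofList _) (PySem.Set.ofList _) = _
      show PySem.Set.update (PySem.Set.ofList _) (PySem.Set.ofList _) = _
      rw [pv_set_update_ofList, ← PySem.Set.ofList_append, ← List.filter_append, ← hmap]

-- ===== VERDICT (by name: the statement is the Claim_ definition above) =====
theorem filter_bibtex_entries_spec : Claim_equal_filter_bibtex_entries := by
  intro entries used_keys _
  unfold Spec_filter_bibtex_entries filter_bibtex_entries filter_bibtex_entries_alt
  rw [pv_goB_eq]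
  simp only [pv_fold_split, pv_condfold_set, pv_condfold_dict]
  refine Prod.ext ?_ (Prod.ext ?_ ?_)
  · rfl
  · show PySem.Set.update PySem.Set.empty _ = _
    rw [PySem.Set.update_empty]
  · have he : (fun (r : PySem.Set String) (kv : String × String) =>
        if PySem.Set.contains used_keys kv.1 then r else PySem.Set.add r kv.1)
        = fun r kv => if !PySem.Set.contains used_keys kv.1 then PySem.Set.add r kv.1 else r := by
      funext r kv
      cases PySem.Set.contains used_keys kv.1
      · simp
      · simp
    show List.foldl _ PySem.Set.empty _ = _
    rw [he, pv_condfold_set (fun k => !PySem.Set.contains used_keys k)]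
    show PySem.Set.update PySem.Set.empty _ = _
    rw [PySem.Set.update_empty]
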